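-- pv_equiv track=rewrite | github.com/paulonteri/data-structures-and-algorithms | solutions/Stacks & Queues/minimum_remove_to_make_valid_parentheses.py | removeInvalidClosingbrackets
-- ===== SOURCE A (Python) =====
-- def removeInvalidClosingbrackets(s, opening, closing):
--     result = []
--
--     opening_count = 0
--     for char in s:
--         if char == opening:
--             opening_count += 1
--             result.append(char)
--         elif char == closing:
--             # only add valid ones
--             if opening_count > 0:
--                 result.append(char)
--                 opening_count -= 1
--         else:
--             result.append(char)
--
--     return result
-- ===== SOURCE B (Python) =====
-- def removeInvalidClosingbrackets(s, opening, closing):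
--     # Pass 1: record the indices of invalid closing brackets (closings seen
--     # while no unmatched opening is available).
--     bad = set()
--     balance = 0
--     for i, char in enumerate(s):
--         if char == opening:
--             balance += 1
--         elif char == closing:
--             if balance > 0:
--                 balance -= 1
--             else:
--                 bad.add(i)
--     # Pass 2: keep every character whose index was not marked.
--     return [char for i, char in enumerate(s) if i not in bad]
-- ===== Notes on version B (the rewrite author's own statement) =====
-- stated objective: alternative
-- what changed: A builds the output inside one counting loop; B first marks the indices of invalid closing brackets in a balance-counting pass into a set, then filters the input by index in a second pass.
import Mathlib
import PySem

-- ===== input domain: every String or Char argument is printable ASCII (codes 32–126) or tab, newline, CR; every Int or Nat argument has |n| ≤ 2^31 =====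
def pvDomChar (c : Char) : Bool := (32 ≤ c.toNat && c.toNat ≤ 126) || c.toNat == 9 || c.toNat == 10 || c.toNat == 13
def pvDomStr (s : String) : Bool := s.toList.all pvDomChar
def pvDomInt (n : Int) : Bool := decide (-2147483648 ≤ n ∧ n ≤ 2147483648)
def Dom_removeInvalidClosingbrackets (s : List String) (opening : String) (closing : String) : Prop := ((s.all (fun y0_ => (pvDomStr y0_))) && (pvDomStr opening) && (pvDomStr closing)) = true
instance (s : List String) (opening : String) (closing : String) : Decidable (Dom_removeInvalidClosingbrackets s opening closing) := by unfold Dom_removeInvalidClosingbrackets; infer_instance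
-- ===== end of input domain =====

-- B marks invalid closing-bracket indices in a first balance-counting pass, then filters by index; alternative decomposition, same cost.


-- ===== PORT A =====
-- A's single loop: structural recursion over s carrying the opening_count.
def removeInvalidClosingbracketsGo (l : List String) (opening closing : String) (cnt : Int) : List String :=
  match l with
  | [] => []
  | ch :: rest =>
    if ch == opening then ch :: removeInvalidClosingbracketsGo rest opening closing (cnt + 1)
    else if ch == closing then
      (if cnt > 0 then ch :: removeInvalidClosingbracketsGo rest opening closing (cnt - 1)
       else removeInvalidClosingbracketsGo rest opening closing cnt)
    else ch :: removeInvalidClosingbracketsGo rest opening closing cnt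

def removeInvalidClosingbrackets (s : List String) (opening : String) (closing : String) : List String :=
  removeInvalidClosingbracketsGo s opening closing 0

-- ===== PORT B =====
-- Pass 1 of Source B: loop over enumerate(s), collecting bad indices into a set.
def removeInvalidClosingbracketsMark (l : List String) (opening closing : String) (i bal : Int) (bad : PySem.Set Int) : PySem.Set Int :=
  match l with
  | [] => bad
  | ch :: rest =>
    if ch == opening then removeInvalidClosingbracketsMark rest opening closing (i + 1) (bal + 1) bad
    else if ch == closing then
      (if bal > 0 then removeInvalidClosingbracketsMark rest opening closing (i + 1) (bal - 1) bad
       else removeInvalidClosingbracketsMark rest opening closing (i + 1) bal (PySem.Set.add bad i))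
    else removeInvalidClosingbracketsMark rest opening closing (i + 1) bal bad

def removeInvalidClosingbrackets_alt (s : List String) (opening : String) (closing : String) : List String :=
  let bad := removeInvalidClosingbracketsMark s opening closing 0 0 PySem.Set.empty
  ((PySem.List.enumerate s 0).filter (fun p => !(PySem.Set.contains bad p.1))).map (·.2)

-- ===== PRECONDITION & SPEC =====
def Spec_removeInvalidClosingbrackets (s : List String) (opening : String) (closing : String) (out : List String) : Prop := out = removeInvalidClosingbrackets_alt s opening closing
instance (s : List String) (opening : String) (closing : String) (out : List String) : Decidable (Spec_removeInvalidClosingbrackets s opening closing out) := by unfold Spec_removeInvalidClosingbrackets; infer_instance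

-- ===== CLAIM (what is proved, stated in full; the proofs are below) =====
def Claim_equal_removeInvalidClosingbrackets : Prop := ∀ (s : List String) (opening : String) (closing : String), Dom_removeInvalidClosingbrackets s opening closing → Spec_removeInvalidClosingbrackets s opening closing (removeInvalidClosingbrackets s opening closing)

-- ===== LEMMAS AND PROOFS =====

-- Membership in the marked set: old members are kept.
theorem mark_mono (l : List String) (o c : String) (i bal : Int) (bad : PySem.Set Int) (j : Int)
    (hj : j ∈ bad) : j ∈ removeInvalidClosingbracketsMark l o c i bal bad := by
  induction l generalizing i bal bad with
  | nil => simpa [removeInvalidClosingbracketsMark] using hj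
  | cons ch rest ih =>
    simp only [removeInvalidClosingbracketsMark]
    split_ifs with h1 h2 h3
    · exact ih _ _ _ hj
    · exact ih _ _ _ hj
    · exact ih _ _ _ (by simpa [PySem.Set.mem_add _ _ _] using Or.inl hj)
    · exact ih _ _ _ hj

-- Every member of the marked set is an old member or an index ≥ i.
theorem mark_bound (l : List String) (o c : String) (i bal : Int) (bad : PySem.Set Int) (j : Int)
    (hj : j ∈ removeInvalidClosingbracketsMark l o c i bal bad) : j ∈ bad ∨ i ≤ j := by
  induction l generalizing i bal bad with
  | nil => exact Or.inl (by simpa [removeInvalidClosingbracketsMark] using hj)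
  | cons ch rest ih =>
    simp only [removeInvalidClosingbracketsMark] at hj
    split_ifs at hj with h1 h2 h3
    · rcases ih _ _ _ hj with h | h
      · exact Or.inl h
      · exact Or.inr (by omega)
    · rcases ih _ _ _ hj with h | h
      · exact Or.inl h
      · exact Or.inr (by omega)
    · rcases ih _ _ _ hj with h | h
      · rcases (PySem.Set.mem_add _ _ _).1 h with h' | h'
        · exact Or.inl h'
        · exact Or.inr (by omega)
      · exact Or.inr (by omega)
    · rcases ih _ _ _ hj with h | h
      · exact Or.inl h
      · exact Or.inr (by omega)

-- Main invariant: A's loop from balance `bal` equals B's filter of enumerate(s, i)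
-- against the set marked from (i, bal, bad), provided all of bad lies below i.
theorem go_eq_filter (l : List String) (o c : String) (i bal : Int) (bad : PySem.Set Int)
    (hb : ∀ j ∈ bad, j < i) :
    removeInvalidClosingbracketsGo l o c bal =
      ((PySem.List.enumerate l i).filter
        (fun p => !(PySem.Set.contains (removeInvalidClosingbracketsMark l o c i bal bad) p.1))).map (·.2) := by
  induction l generalizing i bal bad with
  | nil => simp [removeInvalidClosingbracketsGo, PySem.List.enumerate_nil]
  | cons ch rest ih =>
    have hnotmem : ∀ (bal' : Int), i ∉ removeInvalidClosingbracketsMark rest o c (i + 1) bal' bad := by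
      intro bal' hmem
      rcases mark_bound rest o c (i+1) bal' bad i hmem with h | h
      · exact absurd (hb i h) (lt_irrefl i)
      · omega
    have hb' : ∀ j ∈ bad, j < i + 1 := fun j hj => by have := hb j hj; omega
    simp only [removeInvalidClosingbracketsGo, removeInvalidClosingbracketsMark,
      PySem.List.enumerate_cons]
    split_ifs with h1 h2 h3
    · -- opening
      rw [List.filter_cons]
      have : (PySem.Set.contains (removeInvalidClosingbracketsMark rest o c (i+1) (bal+1) bad) i) = false := by
        simpa [PySem.Set.contains] using hnotmem (bal+1)
      simp only [this, Bool.not_false]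
      exact congrArg (ch :: ·) (ih (i+1) (bal+1) bad hb')
    · -- valid closing
      rw [List.filter_cons]
      have : (PySem.Set.contains (removeInvalidClosingbracketsMark rest o c (i+1) (bal-1) bad) i) = false := by
        simpa [PySem.Set.contains] using hnotmem (bal-1)
      simp only [this, Bool.not_false]
      exact congrArg (ch :: ·) (ih (i+1) (bal-1) bad hb')
    · -- invalid closing: i is marked, the pair is filtered out
      rw [List.filter_cons]
      have hin : i ∈ removeInvalidClosingbracketsMark rest o c (i+1) bal (PySem.Set.add bad i) :=
        mark_mono rest o c (i+1) bal _ i ((PySem.Set.mem_add _ _ _).2 (Or.inr rfl))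
      have : (PySem.Set.contains (removeInvalidClosingbracketsMark rest o c (i+1) bal (PySem.Set.add bad i)) i) = true := by
        simpa [PySem.Set.contains] using hin
      simp only [this, Bool.not_true, Bool.false_eq_true, if_false]
      refine ih (i+1) bal (PySem.Set.add bad i) ?_
      intro j hj
      rcases (PySem.Set.mem_add _ _ _).1 hj with h | h
      · have := hb j h; omega
      · omega
    · -- other char
      rw [List.filter_cons]
      have : (PySem.Set.contains (removeInvalidClosingbracketsMark rest o c (i+1) bal bad) i) = false := by
        simpa [PySem.Set.contains] using hnotmem bal
      simp only [this, Bool.not_false]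
      exact congrArg (ch :: ·) (ih (i+1) bal bad hb')

-- ===== VERDICT (by name: the statement is the Claim_ definition above) =====
theorem removeInvalidClosingbrackets_spec : Claim_equal_removeInvalidClosingbrackets := by
  intro s o c _
  unfold Spec_removeInvalidClosingbrackets removeInvalidClosingbrackets removeInvalidClosingbrackets_alt
  exact go_eq_filter s o c 0 0 PySem.Set.empty (by intro j hj; simp [PySem.Set.empty] at hj)
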